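-- pv_equiv track=rewrite | github.com/vishnu0x1/workspace | python/bioinformatics/week6/global-alignment.py | construct_alignment
-- ===== SOURCE A (Python) =====
-- def construct_alignment(b, x, y):
--     s, t = '', ''
--     i, j = len(b) - 1, len(b[0]) - 1
--     while i >= 0 or j >= 0:
--         if i < 0 or (j >= 0 and b[i][j] == '←'):
--             s, t = '-' + s, y[j] + t
--             j = j - 1
--         elif j < 0 or (i >= 0 and b[i][j] == '↑'):
--             s, t = x[i] + s, '-' + t
--             i = i - 1
--         else:
--             s, t = x[i] + s, y[j] + t
--             i, j = i - 1, j - 1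
--     return s, t
-- ===== SOURCE B (Python) =====
-- def construct_alignment(b, x, y):
--     # Recursive decomposition: walk the traceback once to collect the list of
--     # aligned column pairs in left-to-right order, then join each component.
--     def go(i, j):
--         if i < 0 and j < 0:
--             return []
--         if i < 0 or (j >= 0 and b[i][j] == '←'):
--             return go(i, j - 1) + [('-', y[j])]
--         if j < 0 or b[i][j] == '↑':
--             return go(i - 1, j) + [(x[i], '-')]
--         return go(i - 1, j - 1) + [(x[i], y[j])]
--     steps = go(len(b) - 1, len(b[0]) - 1)
--     return ''.join(c for c, _ in steps), ''.join(d for _, d in steps)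
-- ===== Notes on version B (the rewrite author's own statement) =====
-- stated objective: alternative
-- what changed: Replaces A's while-loop that prepends characters onto two string accumulators with a recursion on (i, j) that collects the aligned column pairs as a list in left-to-right order and joins each component at the end.
-- outside the precondition, e.g. on construct_alignment([['z'], [], ['q']], 'abc', 'd'): A returns ('abc', '--d'), B returns ('abc', '--d')
import Mathlib
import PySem

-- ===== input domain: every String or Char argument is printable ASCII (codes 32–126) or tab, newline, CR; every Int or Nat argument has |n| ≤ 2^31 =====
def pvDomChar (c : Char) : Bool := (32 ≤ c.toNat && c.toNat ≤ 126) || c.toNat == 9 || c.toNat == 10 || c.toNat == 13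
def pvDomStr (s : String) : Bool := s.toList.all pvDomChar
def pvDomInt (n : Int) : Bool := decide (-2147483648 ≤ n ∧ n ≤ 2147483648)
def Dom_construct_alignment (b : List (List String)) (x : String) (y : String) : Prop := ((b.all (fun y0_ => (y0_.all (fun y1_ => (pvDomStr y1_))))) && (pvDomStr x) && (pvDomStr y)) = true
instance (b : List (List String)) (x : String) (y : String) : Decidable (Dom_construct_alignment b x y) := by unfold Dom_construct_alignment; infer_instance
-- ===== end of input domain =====

-- B replaces A's accumulator while-loop by a recursion that collects the aligned
-- column pairs left-to-right and joins them at the end (objective: alternative).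

-- ===== PORT A =====
-- A's while-loop; fuel only makes the recursion structural (one unit per iteration,
-- never exhausted on the top-level call); none = Python IndexError.
def pvLoopA (b : List (List String)) (x y : List Char) :
    Nat → Int → Int → List Char → List Char → Option (List Char × List Char)
  | 0, _, _, _, _ => none
  | fuel + 1, i, j, s, t =>
    if i ≥ 0 ∨ j ≥ 0 then
      if i < 0 then
        match PySem.List.pyGet? y j with
        | none => none
        | some c => pvLoopA b x y fuel i (j - 1) ('-' :: s) (c :: t)
      else if j ≥ 0 then
        match (PySem.List.pyGet? b i).bind (fun row => PySem.List.pyGet? row j) with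
        | none => none
        | some cell =>
          if cell == "←" then
            match PySem.List.pyGet? y j with
            | none => none
            | some c => pvLoopA b x y fuel i (j - 1) ('-' :: s) (c :: t)
          else if cell == "↑" then
            match PySem.List.pyGet? x i with
            | none => none
            | some c => pvLoopA b x y fuel (i - 1) j (c :: s) ('-' :: t)
          else
            match PySem.List.pyGet? x i, PySem.List.pyGet? y j with
            | some c, some d => pvLoopA b x y fuel (i - 1) (j - 1) (c :: s) (d :: t)
            | _, _ => none
      else  -- i ≥ 0, j < 0: the elif branch fires
        match PySem.List.pyGet? x i with
        | none => none
        | some c => pvLoopA b x y fuel (i - 1) j (c :: s) ('-' :: t)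
    else some (s, t)

def construct_alignment (b : List (List String)) (x : String) (y : String) : String × String :=
  match PySem.List.pyGet? b 0 with
  | none => ("", "")  -- len(b[0]) raises: excluded by Pre_
  | some r0 =>
    match pvLoopA b x.toList y.toList (b.length + r0.length + 1)
        ((b.length : Int) - 1) ((r0.length : Int) - 1) [] [] with
    | none => ("", "")  -- IndexError inside the loop: excluded by Pre_
    | some p => (String.ofList p.1, String.ofList p.2)

-- ===== PORT B =====
-- B's recursive collector: the list of aligned column pairs, oldest first.
def pvGoB (b : List (List String)) (x y : List Char) :
    Nat → Int → Int → Option (List (Char × Char))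
  | 0, _, _ => none
  | fuel + 1, i, j =>
    if i < 0 ∧ j < 0 then some []
    else if i < 0 then
      (pvGoB b x y fuel i (j - 1)).bind fun L =>
        (PySem.List.pyGet? y j).map fun d => L ++ [('-', d)]
    else if j ≥ 0 then
      match (PySem.List.pyGet? b i).bind (fun row => PySem.List.pyGet? row j) with
      | none => none
      | some cell =>
        if cell == "←" then
          (pvGoB b x y fuel i (j - 1)).bind fun L =>
            (PySem.List.pyGet? y j).map fun d => L ++ [('-', d)]
        else if cell == "↑" then
          (pvGoB b x y fuel (i - 1) j).bind fun L =>
            (PySem.List.pyGet? x i).map fun c => L ++ [(c, '-')]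
        else
          (pvGoB b x y fuel (i - 1) (j - 1)).bind fun L =>
            (PySem.List.pyGet? x i).bind fun c =>
              (PySem.List.pyGet? y j).map fun d => L ++ [(c, d)]
    else
      (pvGoB b x y fuel (i - 1) j).bind fun L =>
        (PySem.List.pyGet? x i).map fun c => L ++ [(c, '-')]

def construct_alignment_alt (b : List (List String)) (x : String) (y : String) : String × String :=
  match PySem.List.pyGet? b 0 with
  | none => ("", "")
  | some r0 =>
    match pvGoB b x.toList y.toList (b.length + r0.length + 1)
        ((b.length : Int) - 1) ((r0.length : Int) - 1) with
    | none => ("", "")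
    | some steps => (String.ofList (steps.map Prod.fst), String.ofList (steps.map Prod.snd))

-- ===== PRECONDITION & SPEC =====
-- Pre_ excludes inputs on which Python A raises IndexError: empty b (len(b[0])),
-- x shorter than len(b) or y shorter than len(b[0]) (A always indexes x[len(b)-1]
-- and y[len(b[0])-1]), and — wider than strictly necessary — rows of b shorter
-- than b[0]: on such ragged b whether A raises depends on which cells the arrow
-- path visits, and a sound input-only condition must cover every possible path,
-- so some ragged inputs on which A returns are excluded (see claim.json cites;
-- Python B returns the same value as A there).
def Pre_construct_alignment (b : List (List String)) (x : String) (y : String) : Prop :=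
  b ≠ [] ∧ b.length ≤ x.toList.length ∧ (b.headI).length ≤ y.toList.length ∧
    ∀ row ∈ b, (b.headI).length ≤ row.length
instance (b : List (List String)) (x : String) (y : String) : Decidable (Pre_construct_alignment b x y) := by unfold Pre_construct_alignment; infer_instance

def pvWitness_construct_alignment : List (List String) × String × String := ([["m"]], "A", "b")

def Spec_construct_alignment (b : List (List String)) (x : String) (y : String) (out : String × String) : Prop := out = construct_alignment_alt b x y
instance (b : List (List String)) (x : String) (y : String) (out : String × String) : Decidable (Spec_construct_alignment b x y out) := by unfold Spec_construct_alignment; infer_instance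

-- ===== CLAIM (what is proved, stated in full; the proofs are below) =====
def Claim_equal_construct_alignment : Prop := ∀ (b : List (List String)) (x : String) (y : String), Dom_construct_alignment b x y → Pre_construct_alignment b x y → Spec_construct_alignment b x y (construct_alignment b x y)

-- ===== LEMMAS AND PROOFS =====

theorem pvOptMapBind {α β : Type} (o : Option α) (f : α → β) :
    Option.map f o = o.bind (fun a => some (f a)) := by cases o <;> rfl

-- A's loop with accumulators (s, t) equals B's collector with the column pairs
-- split and appended in front of the accumulators.
theorem pvLoopA_eq_goB (b : List (List String)) (x y : List Char) :
    ∀ (fuel : Nat) (i j : Int) (s t : List Char),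
      pvLoopA b x y fuel i j s t =
        (pvGoB b x y fuel i j).map
          (fun L => (L.map Prod.fst ++ s, L.map Prod.snd ++ t)) := by
  intro fuel
  induction fuel with
  | zero => intro i j s t; rfl
  | succ fuel ih =>
    intro i j s t
    simp only [pvLoopA, pvGoB]
    by_cases hij : i < 0 ∧ j < 0
    · have : ¬ (i ≥ 0 ∨ j ≥ 0) := by omega
      simp [hij, this]
    · have hguard : i ≥ 0 ∨ j ≥ 0 := by omega
      simp only [hguard, if_pos, hij, if_false]
      by_cases hi : i < 0
      · simp only [hi, if_true]
        cases hy : PySem.List.pyGet? y j with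
        | none => simp
        | some c => simp [ih, pvOptMapBind, Option.bind_assoc]
      · simp only [hi, if_false]
        by_cases hj : j ≥ 0
        · simp only [hj, if_true]
          cases hc : (PySem.List.pyGet? b i).bind (fun row => PySem.List.pyGet? row j) with
          | none => simp
          | some cell =>
            by_cases hl : cell == "←"
            · simp only [hl, if_true]
              cases hy : PySem.List.pyGet? y j with
              | none => simp
              | some c => simp [ih, pvOptMapBind, Option.bind_assoc]
            · simp only [hl]
              by_cases hu : cell == "↑"
              · simp only [hu, if_true]
                cases hx : PySem.List.pyGet? x i with
                | none => simp
                | some c => simp [ih, pvOptMapBind, Option.bind_assoc]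
              · simp only [hu]
                cases hx : PySem.List.pyGet? x i with
                | none => simp
                | some c =>
                  cases hy : PySem.List.pyGet? y j with
                  | none => simp
                  | some d => simp [ih, pvOptMapBind, Option.bind_assoc]
        · simp only [hj, if_false]
          cases hx : PySem.List.pyGet? x i with
          | none => simp
          | some c => simp [ih, pvOptMapBind, Option.bind_assoc]

-- ===== VERDICT (by name: the statement is the Claim_ definition above) =====
theorem construct_alignment_spec : Claim_equal_construct_alignment := by
  unfold Claim_equal_construct_alignment
  intro b x y _ _
  unfold Spec_construct_alignment construct_alignment construct_alignment_alt
  cases h0 : PySem.List.pyGet? b 0 with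
  | none => rfl
  | some r0 =>
    simp only [pvLoopA_eq_goB]
    cases hg : pvGoB b x.toList y.toList (b.length + r0.length + 1)
        ((b.length : Int) - 1) ((r0.length : Int) - 1) <;> simp
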